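-- pv_equiv track=rewrite | github.com/sosonamso/engi_stock_ai | multi_train.py | get_seq_cols
-- ===== SOURCE A (Python) =====
-- LSTM_SEQ    = 150   # 시계열 길이
--
-- def get_seq_cols(feat_cols):
--     """LSTM용 시계열 피처 (ret, close_norm, vol_ratio × 150일)"""
--     seq = []
--     for k in range(1, LSTM_SEQ + 1):
--         for prefix in ["ret_", "close_norm_", "vol_ratio_"]:
--             col = f"{prefix}{k}"
--             if col in feat_cols:
--                 seq.append(col)
--     return seq
-- ===== SOURCE B (Python) =====
-- _PREFIXES = ("ret_", "close_norm_", "vol_ratio_")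
-- _ORDER = {str(k): k for k in range(1, 151)}   # canonical day suffixes "1".."150"
--
--
-- def _rank(col):
--     """Grid position of col (day*3 + prefix slot), or None if not a sequence feature."""
--     for r, p in enumerate(_PREFIXES):
--         if col.startswith(p):
--             k = _ORDER.get(col[len(p):])
--             return None if k is None else 3 * k + r
--     return None
--
--
-- def get_seq_cols(feat_cols):
--     seen = set()
--     keyed = []
--     for col in feat_cols:
--         rk = _rank(col)
--         if rk is not None and col not in seen:
--             seen.add(col)
--             keyed.append((rk, col))
--     keyed.sort(key=lambda t: t[0])
--     return [t[1] for t in keyed]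
-- ===== Notes on version B (the rewrite author's own statement) =====
-- stated objective: faster
-- what changed: A enumerates the 150x3 grid of candidate names and scans feat_cols for each one; B makes a single pass over feat_cols decoding each name's grid position via a precomputed suffix table, deduplicates with a seen set, and sorts the survivors by grid position to reproduce A's fixed order.
import Mathlib
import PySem

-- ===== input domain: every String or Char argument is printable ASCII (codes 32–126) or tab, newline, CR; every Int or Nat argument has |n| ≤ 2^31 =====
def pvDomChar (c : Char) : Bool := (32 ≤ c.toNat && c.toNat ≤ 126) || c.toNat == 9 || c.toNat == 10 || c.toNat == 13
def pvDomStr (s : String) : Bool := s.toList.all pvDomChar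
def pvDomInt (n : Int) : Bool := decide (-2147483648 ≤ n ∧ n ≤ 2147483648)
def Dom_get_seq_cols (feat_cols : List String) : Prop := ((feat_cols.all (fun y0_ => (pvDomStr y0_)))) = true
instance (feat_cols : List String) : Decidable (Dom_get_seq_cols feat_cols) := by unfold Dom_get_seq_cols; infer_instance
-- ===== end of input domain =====

-- B: one decoding pass over feat_cols (suffix table + seen set) sorted by grid position,
-- instead of A's 450 membership scans of feat_cols (objective: faster; measured).


-- ===== PORT A =====
def lstmSeq : Int := 150

-- f"{prefix}{k}": concatenation of the prefix's code points with str(k) (exact)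
def fmtCol (p : String) (k : Int) : String := String.ofList (p.toList ++ PySem.Int.toChars k)

def get_seq_cols (feat_cols : List String) : List String :=
  (PySem.List.pyRange 1 (lstmSeq + 1) 1).foldl (fun seq k =>
    ["ret_", "close_norm_", "vol_ratio_"].foldl (fun seq prefix_ =>
      let col := fmtCol prefix_ k
      if feat_cols.contains col then seq ++ [col] else seq) seq) []

-- ===== PORT B =====
-- _ORDER = {str(k): k for k in range(1, 151)}
def orderB : PySem.Dict String Int :=
  (PySem.List.pyRange 1 151 1).foldl (fun d k => d.insert (PySem.Int.toStr k) k) PySem.Dict.empty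

def prefixesB : List String := ["ret_", "close_norm_", "vol_ratio_"]

-- _rank: the for-loop over enumerate(_PREFIXES) with early return, as structural recursion
def rankGo : List (Int × String) → String → Option Int
  | [], _ => none
  | (r, p) :: rest, col =>
    if PySem.Str.startswith col p then
      match orderB.get? (PySem.Str.slice col (some (PySem.Str.len p)) none) with
      | none => none
      | some k => some (3 * k + r)
    else rankGo rest col

def rankB (col : String) : Option Int := rankGo (PySem.List.enumerate prefixesB 0) col

def get_seq_cols_alt (feat_cols : List String) : List String :=
  let st := feat_cols.foldl (fun st col =>
    match rankB col with
    | none => st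
    | some rk =>
      if PySem.Set.contains st.1 col then st
      else (PySem.Set.add st.1 col, st.2 ++ [(rk, col)]))
    ((PySem.Set.empty : PySem.Set String), ([] : List (Int × String)))
  (PySem.List.sorted st.2 (fun t => t.1)).map (fun t => t.2)

-- ===== PRECONDITION & SPEC =====
def Spec_get_seq_cols (feat_cols : List String) (out : List String) : Prop := out = get_seq_cols_alt feat_cols
instance (feat_cols : List String) (out : List String) : Decidable (Spec_get_seq_cols feat_cols out) := by unfold Spec_get_seq_cols; infer_instance

-- ===== CLAIM (what is proved, stated in full; the proofs are below) =====
def Claim_equal_get_seq_cols : Prop := ∀ (feat_cols : List String), Dom_get_seq_cols feat_cols → Spec_get_seq_cols feat_cols (get_seq_cols feat_cols)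

-- ===== LEMMAS AND PROOFS =====

-- the grid of (sort key, column name) pairs, in A's enumeration order
def trip (k : Int) : List (Int × String) :=
  [(3 * k, fmtCol "ret_" k), (3 * k + 1, fmtCol "close_norm_" k), (3 * k + 2, fmtCol "vol_ratio_" k)]

def gridPairs : List (Int × String) := (PySem.List.pyRange 1 151 1).flatMap trip

-- the loop body of B, named for the proofs (definitionally the lambda in get_seq_cols_alt)
def stepF (st : PySem.Set String × List (Int × String)) (col : String) :
    PySem.Set String × List (Int × String) :=
  match rankB col with
  | none => st
  | some rk =>
    if PySem.Set.contains st.1 col then st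
    else (PySem.Set.add st.1 col, st.2 ++ [(rk, col)])

set_option maxRecDepth 10000 in
theorem suffixStrs_nodup : ((PySem.List.pyRange 1 151 1).map PySem.Int.toStr).Nodup := by decide

theorem orderB_items : orderB.items = (PySem.List.pyRange 1 151 1).map (fun k => (PySem.Int.toStr k, k)) := by
  unfold orderB
  have h := PySem.Dict.items_foldl_insert_fresh (PySem.List.pyRange 1 151 1)
    PySem.Int.toStr (fun k => k) (PySem.Dict.empty)
    (fun a _ => by simp [pysem]) suffixStrs_nodup
  simpa using h

theorem orderB_keys_nodup : orderB.keys.Nodup := by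
  have : orderB.keys = (PySem.List.pyRange 1 151 1).map PySem.Int.toStr := by
    simp only [PySem.Dict.keys, orderB_items, List.map_map]; rfl
  rw [this]; exact suffixStrs_nodup

theorem orderB_get?_iff (s : String) (k : Int) :
    orderB.get? s = some k ↔ 1 ≤ k ∧ k ≤ 150 ∧ s = PySem.Int.toStr k := by
  rw [PySem.Dict.get?_eq_some_iff_mem_items _ _ _ orderB_keys_nodup, orderB_items]
  simp only [List.mem_map, PySem.List.mem_pyRange_one, Prod.mk.injEq]
  constructor
  · rintro ⟨k', ⟨h1, h2⟩, hs, hk⟩; subst hk; exact ⟨h1, by omega, hs.symm⟩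
  · rintro ⟨h1, h2, hs⟩; exact ⟨k, ⟨h1, by omega⟩, hs.symm, rfl⟩

theorem slice_toList (col p : String) :
    (PySem.Str.slice col (some (PySem.Str.len p)) none).toList = col.toList.drop p.toList.length := by
  have : PySem.Str.len p = ((p.toList.length : Nat) : Int) := by simp [pysem]
  rw [this]; simp [pysem]

theorem startswith_iff' (col p : String) : PySem.Str.startswith col p = true ↔ p.toList <+: col.toList := by
  simp [pysem, PySem.Chars.startswith_iff]

theorem fmtCol_toList (p : String) (k : Int) : (fmtCol p k).toList = p.toList ++ PySem.Int.toChars k := by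
  simp [fmtCol]

theorem slice_of_fmtCol (p : String) (k : Int) (col : String) (hcol : col = fmtCol p k) :
    PySem.Str.slice col (some (PySem.Str.len p)) none = PySem.Int.toStr k := by
  apply String.toList_inj.mp
  rw [slice_toList, PySem.Int.toList_toStr, hcol, fmtCol_toList]; simp

theorem branch_char (p col : String) (r n : Int) (hsw : PySem.Str.startswith col p = true) :
    (match orderB.get? (PySem.Str.slice col (some (PySem.Str.len p)) none) with
     | none => none
     | some k => some (3 * k + r)) = some n
    ↔ ∃ k : Int, 1 ≤ k ∧ k ≤ 150 ∧ col = fmtCol p k ∧ n = 3 * k + r := by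
  obtain ⟨t, ht⟩ := (startswith_iff' col p).mp hsw
  cases hg : orderB.get? (PySem.Str.slice col (some (PySem.Str.len p)) none) with
  | none =>
    simp only []
    constructor
    · intro h; cases h
    · rintro ⟨k, h1, h2, hcol, hn⟩
      rw [slice_of_fmtCol p k col hcol, (orderB_get?_iff _ k).mpr ⟨h1, h2, rfl⟩] at hg; cases hg
  | some k =>
    obtain ⟨h1, h2, hs⟩ := (orderB_get?_iff _ k).mp hg
    have hcol : col = fmtCol p k := by
      apply String.toList_inj.mp
      rw [fmtCol_toList, ← PySem.Int.toList_toStr, ← hs, slice_toList, ← ht]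
      simp
    simp only [Option.some.injEq]
    constructor
    · intro h; exact ⟨k, h1, h2, hcol, h.symm⟩
    · rintro ⟨k', h1', h2', hcol', hn⟩
      rw [slice_of_fmtCol p k' col hcol', (orderB_get?_iff _ k').mpr ⟨h1', h2', rfl⟩] at hg
      cases hg; omega

theorem retChars : ("ret_" : String).toList = ['r','e','t','_'] := by decide
theorem cnChars : ("close_norm_" : String).toList = ['c','l','o','s','e','_','n','o','r','m','_'] := by decide
theorem vrChars : ("vol_ratio_" : String).toList = ['v','o','l','_','r','a','t','i','o','_'] := by decide

theorem sw_self (p : String) (k : Int) : PySem.Str.startswith (fmtCol p k) p = true := by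
  rw [startswith_iff', fmtCol_toList]; exact List.prefix_append _ _

theorem ns_cn_ret (k : Int) : PySem.Str.startswith (fmtCol "close_norm_" k) "ret_" = false := by
  rw [← Bool.not_eq_true, startswith_iff', fmtCol_toList, retChars, cnChars]
  intro h; simpa using (List.cons_prefix_cons.mp h).1

theorem ns_vr_ret (k : Int) : PySem.Str.startswith (fmtCol "vol_ratio_" k) "ret_" = false := by
  rw [← Bool.not_eq_true, startswith_iff', fmtCol_toList, retChars, vrChars]
  intro h; simpa using (List.cons_prefix_cons.mp h).1

theorem ns_vr_cn (k : Int) : PySem.Str.startswith (fmtCol "vol_ratio_" k) "close_norm_" = false := by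
  rw [← Bool.not_eq_true, startswith_iff', fmtCol_toList, cnChars, vrChars]
  intro h; simpa using (List.cons_prefix_cons.mp h).1

theorem rankB_iff (col : String) (n : Int) :
    rankB col = some n ↔ ∃ k : Int, 1 ≤ k ∧ k ≤ 150 ∧
      ((col = fmtCol "ret_" k ∧ n = 3 * k) ∨
       (col = fmtCol "close_norm_" k ∧ n = 3 * k + 1) ∨
       (col = fmtCol "vol_ratio_" k ∧ n = 3 * k + 2)) := by
  have henum : PySem.List.enumerate prefixesB 0 = [(0, "ret_"), (1, "close_norm_"), (2, "vol_ratio_")] := by decide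
  rw [rankB, henum]
  show rankGo _ col = some n ↔ _
  rw [rankGo]
  by_cases h0 : PySem.Str.startswith col "ret_" = true
  · rw [if_pos h0]
    rw [branch_char "ret_" col 0 n h0]
    constructor
    · rintro ⟨k, h1, h2, hcol, hn⟩; exact ⟨k, h1, h2, Or.inl ⟨hcol, by omega⟩⟩
    · rintro ⟨k, h1, h2, hd⟩
      rcases hd with ⟨hcol, hn⟩ | ⟨hcol, hn⟩ | ⟨hcol, hn⟩
      · exact ⟨k, h1, h2, hcol, by omega⟩
      · rw [hcol] at h0; rw [ns_cn_ret] at h0; cases h0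
      · rw [hcol] at h0; rw [ns_vr_ret] at h0; cases h0
  · rw [if_neg h0, rankGo]
    by_cases h1 : PySem.Str.startswith col "close_norm_" = true
    · rw [if_pos h1, branch_char "close_norm_" col 1 n h1]
      constructor
      · rintro ⟨k, ha, hb, hcol, hn⟩; exact ⟨k, ha, hb, Or.inr (Or.inl ⟨hcol, hn⟩)⟩
      · rintro ⟨k, ha, hb, hd⟩
        rcases hd with ⟨hcol, hn⟩ | ⟨hcol, hn⟩ | ⟨hcol, hn⟩
        · exact absurd (hcol ▸ sw_self "ret_" k) h0
        · exact ⟨k, ha, hb, hcol, hn⟩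
        · rw [hcol] at h1; rw [ns_vr_cn] at h1; cases h1
    · rw [if_neg h1, rankGo]
      by_cases h2 : PySem.Str.startswith col "vol_ratio_" = true
      · rw [if_pos h2, branch_char "vol_ratio_" col 2 n h2]
        constructor
        · rintro ⟨k, ha, hb, hcol, hn⟩; exact ⟨k, ha, hb, Or.inr (Or.inr ⟨hcol, hn⟩)⟩
        · rintro ⟨k, ha, hb, hd⟩
          rcases hd with ⟨hcol, hn⟩ | ⟨hcol, hn⟩ | ⟨hcol, hn⟩
          · exact absurd (hcol ▸ sw_self "ret_" k) h0
          · exact absurd (hcol ▸ sw_self "close_norm_" k) h1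
          · exact ⟨k, ha, hb, hcol, hn⟩
      · rw [if_neg h2, rankGo]
        constructor
        · intro h; cases h
        · rintro ⟨k, ha, hb, hd⟩
          rcases hd with ⟨hcol, hn⟩ | ⟨hcol, hn⟩ | ⟨hcol, hn⟩
          · exact absurd (hcol ▸ sw_self "ret_" k) h0
          · exact absurd (hcol ▸ sw_self "close_norm_" k) h1
          · exact absurd (hcol ▸ sw_self "vol_ratio_" k) h2

theorem mem_gridPairs (q : Int × String) : q ∈ gridPairs ↔ rankB q.2 = some q.1 := by
  rw [rankB_iff]
  simp only [gridPairs, List.mem_flatMap, PySem.List.mem_pyRange_one, trip, List.mem_cons,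
    List.not_mem_nil, or_false, Prod.ext_iff]
  constructor
  · rintro ⟨k, ⟨hk1, hk2⟩, h⟩; exact ⟨k, hk1, by omega, by tauto⟩
  · rintro ⟨k, hk1, hk2, h⟩; exact ⟨k, ⟨hk1, by omega⟩, by tauto⟩

theorem gridPairs_pairwise : gridPairs.Pairwise (fun a b => a.1 < b.1) := by
  rw [gridPairs, List.pairwise_flatMap]
  refine ⟨fun k _ => by simp [trip, Prod.ext_iff]; omega, ?_⟩
  refine List.Pairwise.imp ?_ (PySem.List.pairwise_lt_pyRange_one (a := 1) (b := 151))
  intro a b hab x hx y hy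
  simp only [trip, List.mem_cons, List.not_mem_nil, or_false, Prod.ext_iff] at hx hy
  rcases hx with ⟨h,_⟩|⟨h,_⟩|⟨h,_⟩ <;> rcases hy with ⟨h',_⟩|⟨h',_⟩|⟨h',_⟩ <;> omega


theorem perk (fc : List String) (k : Int) :
    (List.filter (fun p => fc.contains (fmtCol p k)) ["ret_", "close_norm_", "vol_ratio_"]).map
        (fun p => fmtCol p k)
      = ((trip k).filter (fun q => fc.contains q.2)).map (fun q => q.2) := by
  by_cases h0 : fmtCol "ret_" k ∈ fc <;> by_cases h1 : fmtCol "close_norm_" k ∈ fc <;>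
    by_cases h2 : fmtCol "vol_ratio_" k ∈ fc <;>
    simp [trip, h0, h1, h2]

theorem A_char (fc : List String) :
    get_seq_cols fc = (gridPairs.filter (fun q => fc.contains q.2)).map (fun q => q.2) := by
  unfold get_seq_cols
  have hfun : (fun (seq : List String) (k : Int) =>
      ["ret_", "close_norm_", "vol_ratio_"].foldl (fun seq prefix_ =>
        let col := fmtCol prefix_ k
        if fc.contains col then seq ++ [col] else seq) seq)
      = (fun seq k => seq ++ ((trip k).filter (fun q => fc.contains q.2)).map (fun q => q.2)) := by
    funext seq k
    have h := PySem.List.foldl_append_if (fun p => fc.contains (fmtCol p k)) (fun p => fmtCol p k)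
      ["ret_", "close_norm_", "vol_ratio_"] seq
    rw [show (fun (seq : List String) prefix_ =>
        let col := fmtCol prefix_ k
        if fc.contains col then seq ++ [col] else seq)
      = (fun acc x => if (fun p => fc.contains (fmtCol p k)) x = true then acc ++ [(fun p => fmtCol p k) x] else acc) from rfl, h, perk]
  rw [hfun, PySem.List.foldl_append_eq_flatMap, show lstmSeq + 1 = (151 : Int) from rfl,
    gridPairs, List.filter_flatMap, List.map_flatMap]
  simp


theorem loopB_spec (l : List String) (S : PySem.Set String) (acc : List (Int × String))
    (hS : ∀ c : String, c ∈ S ↔ c ∈ acc.map (fun q => q.2))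
    (hnd : (acc.map (fun q : Int × String => q.2)).Nodup) :
    (∀ q : Int × String, q ∈ (l.foldl stepF (S, acc)).2 ↔
        q ∈ acc ∨ (q.2 ∈ l ∧ rankB q.2 = some q.1 ∧ q.2 ∉ S))
    ∧ ((l.foldl stepF (S, acc)).2.map (fun q : Int × String => q.2)).Nodup := by
  induction l generalizing S acc with
  | nil => exact ⟨fun q => by simp, hnd⟩
  | cons c l' ih =>
    rw [List.foldl_cons]
    cases hrk : rankB c with
    | none =>
      rw [show stepF (S, acc) c = (S, acc) from by simp [stepF, hrk]]
      obtain ⟨hmem, hnd'⟩ := ih S acc hS hnd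
      refine ⟨fun q => ?_, hnd'⟩
      rw [hmem]
      constructor
      · rintro (h | ⟨h1, h2, h3⟩)
        · exact Or.inl h
        · exact Or.inr ⟨List.mem_cons_of_mem _ h1, h2, h3⟩
      · rintro (h | ⟨h1, h2, h3⟩)
        · exact Or.inl h
        · rcases List.mem_cons.mp h1 with rfl | h1'
          · rw [hrk] at h2; cases h2
          · exact Or.inr ⟨h1', h2, h3⟩
    | some rk =>
      by_cases hc : c ∈ S
      · rw [show stepF (S, acc) c = (S, acc) from by
          simp [stepF, hrk, hc]]
        obtain ⟨hmem, hnd'⟩ := ih S acc hS hnd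
        refine ⟨fun q => ?_, hnd'⟩
        rw [hmem]
        constructor
        · rintro (h | ⟨h1, h2, h3⟩)
          · exact Or.inl h
          · exact Or.inr ⟨List.mem_cons_of_mem _ h1, h2, h3⟩
        · rintro (h | ⟨h1, h2, h3⟩)
          · exact Or.inl h
          · rcases List.mem_cons.mp h1 with rfl | h1'
            · exact absurd hc h3
            · exact Or.inr ⟨h1', h2, h3⟩
      · have hcb : PySem.Set.contains S c = false := by
          rw [← Bool.not_eq_true]; intro h; exact hc ((PySem.Set.contains_iff S c).mp h)
        rw [show stepF (S, acc) c = (PySem.Set.add S c, acc ++ [(rk, c)]) from by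
          simp [stepF, hrk, hc]]
        have hcnacc : c ∉ acc.map (fun q : Int × String => q.2) := fun h => hc ((hS c).mpr h)
        have hS' : ∀ c' : String, c' ∈ PySem.Set.add S c ↔
            c' ∈ (acc ++ [(rk, c)]).map (fun q : Int × String => q.2) := by
          intro c'
          rw [PySem.Set.mem_add]
          simp only [List.map_append, List.map_cons, List.map_nil, List.mem_append,
            List.mem_singleton]
          rw [hS c']
        have hnd'' : ((acc ++ [(rk, c)]).map (fun q : Int × String => q.2)).Nodup := by
          simp only [List.map_append, List.map_cons, List.map_nil]
          rw [List.nodup_append]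
          refine ⟨hnd, List.nodup_singleton _, ?_⟩
          intro a ha b hb
          rw [List.mem_singleton] at hb
          subst hb
          intro h; subst h; exact hcnacc ha
        obtain ⟨hmem, hnd'⟩ := ih (PySem.Set.add S c) (acc ++ [(rk, c)]) hS' hnd''
        refine ⟨fun q => ?_, hnd'⟩
        rw [hmem]
        simp only [List.mem_append, List.mem_singleton, PySem.Set.mem_add]
        constructor
        · rintro ((h | rfl) | ⟨h1, h2, h3⟩)
          · exact Or.inl h
          · exact Or.inr ⟨List.mem_cons_self .., hrk, hc⟩
          · exact Or.inr ⟨List.mem_cons_of_mem _ h1, h2, fun h => h3 (Or.inl h)⟩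
        · rintro (h | ⟨h1, h2, h3⟩)
          · exact Or.inl (Or.inl h)
          · rcases List.mem_cons.mp h1 with hq | h1'
            · rw [hq] at h2; rw [hrk] at h2
              exact Or.inl (Or.inr (by rw [Prod.ext_iff, hq]; exact ⟨by injection h2 with h; exact h.symm, rfl⟩))
            · by_cases hqc : q.2 = c
              · rw [hqc, hrk] at h2
                exact Or.inl (Or.inr (Prod.ext_iff.mpr ⟨by injection h2 with h; exact h.symm, hqc⟩))
              · exact Or.inr ⟨h1', h2, fun h => by
                  rcases h with h | h
                  · exact h3 h
                  · exact hqc h⟩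


theorem final (fc : List String) : get_seq_cols fc = get_seq_cols_alt fc := by
  rw [A_char]
  show _ = (PySem.List.sorted (fc.foldl stepF (PySem.Set.empty, [])).2 (fun t => t.1)).map (fun t => t.2)
  obtain ⟨hmem, hnd⟩ := loopB_spec fc PySem.Set.empty []
    (fun c => by simp [PySem.Set.empty]) (by simp)
  set L := (fc.foldl stepF (PySem.Set.empty, [])).2 with hL
  set T := gridPairs.filter (fun q => fc.contains q.2) with hT
  have hTpw : T.Pairwise (fun a b => a.1 < b.1) :=
    List.Pairwise.sublist (List.filter_sublist) gridPairs_pairwise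
  have hTnd : T.Nodup := by
    refine List.Pairwise.imp ?_ hTpw
    intro a b h he
    rw [he] at h; omega
  have hLnd : L.Nodup := List.Nodup.of_map _ hnd
  have hperm : T.Perm L := by
    rw [List.perm_ext_iff_of_nodup hTnd hLnd]
    intro q
    rw [hT, List.mem_filter, mem_gridPairs, hmem q]
    constructor
    · rintro ⟨hrk, hcont⟩
      refine Or.inr ⟨List.contains_iff_mem.mp hcont, hrk, ?_⟩
      simp [PySem.Set.empty]
    · rintro (h | ⟨h1, h2, _⟩)
      · simp at h
      · exact ⟨h2, List.contains_iff_mem.mpr h1⟩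
  rw [PySem.List.sorted_eq_of_perm_of_pairwise_lt L T (fun t => t.1) hperm hTpw]

-- ===== VERDICT (by name: the statement is the Claim_ definition above) =====
theorem get_seq_cols_spec : Claim_equal_get_seq_cols := by
  intro feat_cols _
  unfold Spec_get_seq_cols
  exact final feat_cols
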